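-- pv_equiv track=rewrite | github.com/corsaczagi/GenAI-2-41-Text-generation | Text_generation-repetition_control.py | count_repeating_ngrams
-- ===== SOURCE A (Python) =====
-- from collections import Counter
--
-- def count_repeating_ngrams(text: str, n: int = 2) -> int:
--     """
--     Подсчитывает количество повторяющихся n-грамм в тексте.
--     Возвращает общее количество повторяющихся n-грамм.
--     """
--     words = text.split()
--     if len(words) < n:
--         return 0
--
--     ngrams = [tuple(words[i:i + n]) for i in range(len(words) - n + 1)]
--     ngram_counts = Counter(ngrams)
--
--     # Считаем только те n-граммы, которые встречаются более 1 раза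
--     repeating_count = sum(count for count in ngram_counts.values() if count > 1)
--     return repeating_count
-- ===== SOURCE B (Python) =====
-- def count_repeating_ngrams(text: str, n: int = 2) -> int:
--     """Sort the n-grams and scan runs of equal ones: a run of length > 1
--     contributes its length to the total (no counter/hash map is built)."""
--     words = text.split()
--     if len(words) < n:
--         return 0
--     ngrams = sorted(tuple(words[i:i + n]) for i in range(len(words) - n + 1))
--     cur = ngrams[0]
--     run = 1
--     total = 0
--     for g in ngrams[1:]:
--         if g == cur:
--             run += 1
--         else:
--             if run > 1:
--                 total += run
--             cur = g
--             run = 1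
--     if run > 1:
--         total += run
--     return total
-- ===== Notes on version B (the rewrite author's own statement) =====
-- stated objective: alternative
-- what changed: Replaces A's Counter aggregation (hash multiset, then summing the multiplicities greater than 1) with a sort-and-scan strategy: the n-gram list is sorted and scanned once, tracking the current run of equal n-grams and adding each run's length to the total when it ends with length > 1.
import Mathlib
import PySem

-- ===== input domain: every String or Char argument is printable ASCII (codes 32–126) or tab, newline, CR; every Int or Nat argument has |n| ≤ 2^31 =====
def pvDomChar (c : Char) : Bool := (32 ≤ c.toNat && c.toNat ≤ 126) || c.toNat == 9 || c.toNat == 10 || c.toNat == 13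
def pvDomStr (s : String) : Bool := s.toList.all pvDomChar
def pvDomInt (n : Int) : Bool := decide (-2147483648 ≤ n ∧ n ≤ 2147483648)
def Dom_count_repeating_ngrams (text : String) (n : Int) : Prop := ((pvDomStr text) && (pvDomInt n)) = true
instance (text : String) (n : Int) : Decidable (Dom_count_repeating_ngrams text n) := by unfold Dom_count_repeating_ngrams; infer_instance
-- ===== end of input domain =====

-- B replaces A's Counter aggregation (hash multiset, then summing the multiplicities > 1) by a
-- sort-and-scan strategy: sort the n-gram list, scan it once tracking the current run of equal
-- n-grams, and add each run's length to the total when it ends with length > 1; same return value.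

-- ===== PORT A =====
-- words[i:i+n] as a variable-length tuple of strings is ported as List String.
def count_repeating_ngrams (text : String) (n : Int) : Int :=
  let words := PySem.Str.split₀ text
  if (words.length : Int) < n then 0
  else
    let ngrams := (PySem.List.pyRange 0 ((words.length : Int) - n + 1) 1).map
      (fun i => PySem.List.slice words (some i) (some (i + n)))
    let ngram_counts := PySem.Dict.counter ngrams
    ((ngram_counts.values).filter (fun v => decide (1 < v))).sum

-- ===== PORT B =====
-- one scan step: extend the current run (cur, run, total) or flush it into the total
def pvStep (s : List String × Int × Int) (g : List String) : List String × Int × Int :=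
  if g = s.1 then (s.1, s.2.1 + 1, s.2.2)
  else (g, 1, s.2.2 + if 1 < s.2.1 then s.2.1 else 0)

def count_repeating_ngrams_alt (text : String) (n : Int) : Int :=
  let words := PySem.Str.split₀ text
  if (words.length : Int) < n then 0
  else
    let ngrams := (PySem.List.pyRange 0 ((words.length : Int) - n + 1) 1).map
      (fun i => PySem.List.slice words (some i) (some (i + n)))
    match PySem.List.sorted ngrams (fun g => g) false with
    | [] => 0   -- unreachable: under the guard there is at least one n-gram (ngrams[0] exists)
    | c0 :: rest =>
      let st := rest.foldl pvStep (c0, 1, 0)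
      st.2.2 + if 1 < st.2.1 then st.2.1 else 0

-- ===== PRECONDITION & SPEC =====
def Spec_count_repeating_ngrams (text : String) (n : Int) (out : Int) : Prop := out = count_repeating_ngrams_alt text n
instance (text : String) (n : Int) (out : Int) : Decidable (Spec_count_repeating_ngrams text n out) := by unfold Spec_count_repeating_ngrams; infer_instance

-- ===== CLAIM (what is proved, stated in full; the proofs are below) =====
def Claim_equal_count_repeating_ngrams : Prop := ∀ (text : String) (n : Int), Dom_count_repeating_ngrams text n → Spec_count_repeating_ngrams text n (count_repeating_ngrams text n)

-- ===== LEMMAS AND PROOFS =====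

-- run payoff: a run of length r contributes r if r > 1, else 0
def pvPayoff (r : Int) : Int := if 1 < r then r else 0

-- recursive run-total: once equal elements are contiguous, the head run of (a :: l) has length
-- 1 + count a l and the remaining runs live in l with the a's removed
def pvR : List (List String) → Int
  | [] => 0
  | a :: l => pvPayoff (1 + (l.count a : Int)) + pvR (l.filter (· ≠ a))
  termination_by l => l.length
  decreasing_by
    simp only [List.length_unattach]
    exact Nat.lt_succ_of_le (le_trans (List.length_filter_le _ _) (by simp))

-- pvR of ANY list equals the number of positions whose element occurs more than once
lemma pv_R_eq_countP : ∀ (l : List (List String)),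
    pvR l = (l.countP (fun g => decide (1 < l.count g)) : Int) := by
  have H : ∀ (N : Nat) (l : List (List String)), l.length ≤ N →
      pvR l = (l.countP (fun g => decide (1 < l.count g)) : Int) := by
    intro N
    induction N with
    | zero =>
        intro l hl
        have : l = [] := List.eq_nil_of_length_eq_zero (Nat.le_zero.mp hl)
        subst this; simp [pvR]
    | succ N ih =>
        intro l hl
        match l with
        | [] => simp [pvR]
        | a :: l =>
          set p : List String → Bool := fun g => decide (1 < (a :: l).count g) with hp
          have hIH := ih (l.filter (· ≠ a)) (le_trans (List.length_filter_le _ _) (Nat.succ_le_succ_iff.mp hl))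
          have hsplit : l.countP p
              = (l.filter (fun x => x == a)).countP p + (l.filter (fun x => !(x == a))).countP p :=
            List.countP_eq_countP_filter_add l p (fun x => x == a)
          have hca : (a :: l).count a = l.count a + 1 := by
            rw [List.count_cons]; simp
          -- positions equal to a
          have h1 : (l.filter (fun x => x == a)).countP p = if p a then l.count a else 0 := by
            rw [List.countP_filter]
            by_cases hpa : p a = true
            · have he : (fun x => p x && (x == a)) = (fun x => x == a) := by
                funext x
                by_cases hx : x = a
                · subst hx; simp [hpa]
                · simp [hx]
              rw [he, hpa]; simp [List.count]
            · have hz : ∀ x ∈ l, ¬ (p x && (x == a)) = true := by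
                intro x _ hx
                have h2 := (Bool.and_eq_true _ _).mp hx
                have : x = a := by simpa using h2.2
                subst this; exact hpa h2.1
              simp [List.countP_eq_zero.mpr hz, hpa]
          -- positions different from a
          have hfe : l.filter (fun x => !(x == a)) = l.filter (· ≠ a) := by
            apply List.filter_congr; intro x _
            by_cases h : x = a <;> simp [h]
          have h2 : (l.filter (fun x => !(x == a))).countP p
              = (l.filter (· ≠ a)).countP (fun g => decide (1 < (l.filter (· ≠ a)).count g)) := by
            rw [hfe]
            apply List.countP_congr
            intro x hx
            have hxa : x ≠ a := by simpa using (List.mem_filter.mp hx).2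
            have hc1 : (a :: l).count x = l.count x := by
              rw [List.count_cons]; simp [(beq_eq_false_iff_ne.mpr (Ne.symm hxa))]
            have hc2 : (l.filter (· ≠ a)).count x = l.count x :=
              List.count_filter (by simp [hxa])
            have hcc : (a :: l).count x = (l.filter (· ≠ a)).count x := by rw [hc1, hc2]
            simp only [hp]
            rw [hcc]
          rw [show pvR (a :: l) = pvPayoff (1 + (l.count a : Int)) + pvR (l.filter (· ≠ a)) from by rw [pvR],
              hIH, List.countP_cons, hsplit, h1, h2]
          by_cases hc : 0 < l.count a
          · have hpa : p a = true := by
              simp only [hp, hca, decide_eq_true_eq]; omega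
            rw [hpa]
            simp only [pvPayoff, if_pos (show (1:Int) < 1 + (l.count a : Int) by
              have : (0:Int) < (l.count a : Int) := by exact_mod_cast hc
              omega)]
            push_cast; ring
          · have h0 : l.count a = 0 := by omega
            have hpa : p a = false := by
              simp only [hp, hca, h0]; simp
            simp [hpa, pvPayoff, h0]
  intro l; exact H l.length l le_rfl

-- the scan computes t + payoff(extended current run) + pvR(everything after the c-run),
-- provided the input is run-contiguous (Pairwise ≤) and ≥ the current run's element c
lemma pv_scan : ∀ (l : List (List String)), l.Pairwise (· ≤ ·) → ∀ (c : List String),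
    (∀ x ∈ l, c ≤ x) → ∀ (r t : Int),
    (l.foldl pvStep (c, r, t)).2.2 + pvPayoff (l.foldl pvStep (c, r, t)).2.1
      = t + pvPayoff (r + (l.count c : Int)) + pvR (l.filter (· ≠ c)) := by
  intro l
  induction l with
  | nil => intro _ c _ r t; simp [pvPayoff, pvR]
  | cons a l ih =>
      intro hp c hc r t
      obtain ⟨ha, hp'⟩ := List.pairwise_cons.mp hp
      by_cases hac : a = c
      · subst hac
        have hc' : ∀ x ∈ l, a ≤ x := ha
        have hcount : ((a :: l).count a : Int) = (l.count a : Int) + 1 := by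
          rw [List.count_cons]; push_cast; simp
        have hfil : (a :: l).filter (· ≠ a) = l.filter (· ≠ a) := by
          simp
        rw [List.foldl_cons, show pvStep (a, r, t) a = (a, r + 1, t) from by simp [pvStep],
            ih hp' a hc' (r + 1) t, hcount, hfil,
            show r + 1 + (l.count a : Int) = r + ((l.count a : Int) + 1) from by ring]
      · -- a ≠ c: the run flushes, and c never occurs again
        have hca : c < a := lt_of_le_of_ne (hc a List.mem_cons_self) (Ne.symm hac)
        have hnotc : ∀ x ∈ a :: l, x ≠ c := by
          intro x hx
          rcases List.mem_cons.mp hx with h | h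
          · subst h; exact hac
          · intro hxc
            have hax : a ≤ x := ha x h
            rw [hxc] at hax
            exact absurd (lt_of_lt_of_le hca hax) (lt_irrefl _)
        have hcount : ((a :: l).count c : Int) = 0 := by
          have : (a :: l).count c = 0 := List.count_eq_zero.mpr (fun hm => hnotc c hm rfl)
          simp [this]
        have hfil : (a :: l).filter (· ≠ c) = a :: l := List.filter_eq_self.mpr
          (fun x hx => by simpa using hnotc x hx)
        rw [List.foldl_cons, show pvStep (c, r, t) a = (a, 1, t + pvPayoff r) from by
              simp [pvStep, hac, pvPayoff],
            ih hp' a ha 1 (t + pvPayoff r), hcount, hfil,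
            show pvR (a :: l) = pvPayoff (1 + (l.count a : Int)) + pvR (l.filter (· ≠ a)) from by rw [pvR]]
        rw [show r + (0:Int) = r from by ring]
        ring

-- A-side: sum of the filtered values as a sum of if-guarded values
lemma pv_sum_filter_lt (l : List Int) :
    (l.filter (fun v => decide (1 < v))).sum = (l.map (fun v => if 1 < v then v else 0)).sum := by
  induction l with
  | nil => rfl
  | cons a t ih =>
      by_cases h : 1 < a <;> simp [h, ih]

lemma pv_sum_indicator_zero {α : Type} [DecidableEq α] (p : α → Prop) [DecidablePred p] (a : α) :
    ∀ (d : List α), a ∉ d →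
      (d.map (fun k => if p k ∧ k = a then (1 : Int) else 0)).sum = 0 := by
  intro d
  induction d with
  | nil => intro _; rfl
  | cons b t ih =>
      intro h
      have hba : ¬ (b = a) := fun hb => h (hb ▸ List.mem_cons_self)
      have ht : a ∉ t := fun hm => h (List.mem_cons_of_mem _ hm)
      simp [hba, ih ht]

lemma pv_sum_indicator_one {α : Type} [DecidableEq α] (p : α → Prop) [DecidablePred p] (a : α) :
    ∀ (d : List α), d.Nodup → a ∈ d →
      (d.map (fun k => if p k ∧ k = a then (1 : Int) else 0)).sum = if p a then 1 else 0 := by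
  intro d
  induction d with
  | nil => intro _ h; cases h
  | cons b t ih =>
      intro hnd hmem
      rcases List.mem_cons.mp hmem with hba | hmt
      · have hnt : a ∉ t := by
          subst hba; exact (List.nodup_cons.mp hnd).1
        subst hba
        simp [pv_sum_indicator_zero p a t hnt]
      · have hba : ¬ (b = a) := by
          intro hb; subst hb; exact (List.nodup_cons.mp hnd).1 hmt
        have := ih (List.nodup_cons.mp hnd).2 hmt
        simp [hba, this]

-- sum over distinct keys of guarded multiplicities = number of elements satisfying the guard
lemma pv_sum_count {α : Type} [BEq α] [LawfulBEq α] [DecidableEq α] (p : α → Prop) [DecidablePred p]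
    (d : List α) (hd : d.Nodup) :
    ∀ (xs : List α), (∀ x ∈ xs, x ∈ d) →
      (d.map (fun k => if p k then (List.count k xs : Int) else 0)).sum
        = (List.countP (fun g => decide (p g)) xs : Int) := by
  intro xs
  induction xs with
  | nil => intro _; simp
  | cons a t ih =>
      intro hsub
      have hat : ∀ x ∈ t, x ∈ d := fun x hx => hsub x (List.mem_cons_of_mem _ hx)
      have had : a ∈ d := hsub a List.mem_cons_self
      have hmap : (d.map (fun k => if p k then (List.count k (a :: t) : Int) else 0))
          = d.map (fun k => (if p k then (List.count k t : Int) else 0)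
              + (if p k ∧ k = a then (1 : Int) else 0)) := by
        apply List.map_congr_left
        intro k _
        have hc : List.count k (a :: t) = List.count k t + if a == k then 1 else 0 :=
          List.count_cons
        by_cases hp : p k
        · by_cases hk : k = a
          · subst hk
            rw [hc]
            simp [hp]
          · have hne : (a == k) = false := beq_eq_false_iff_ne.mpr (Ne.symm hk)
            rw [hc, hne]
            simp [hp, hk]
        · simp [hp]
      rw [hmap, PySem.List.sum_map_add_int, ih hat,
          pv_sum_indicator_one p a d hd had, List.countP_cons]
      by_cases hp : p a <;> simp [hp]

lemma pv_main (text : String) (n : Int) :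
    count_repeating_ngrams text n = count_repeating_ngrams_alt text n := by
  unfold count_repeating_ngrams count_repeating_ngrams_alt
  by_cases h : ((PySem.Str.split₀ text).length : Int) < n
  · simp [h]
  · simp only [if_neg h]
    set xs := (PySem.List.pyRange 0 (((PySem.Str.split₀ text).length : Int) - n + 1) 1).map
      (fun i => PySem.List.slice (PySem.Str.split₀ text) (some i) (some (i + n))) with hxs
    -- A's value = number of positions whose n-gram repeats
    have hA : ((PySem.Dict.counter xs).values.filter (fun v => decide (1 < v))).sum
        = (xs.countP (fun g => decide (1 < (xs.count g : Int))) : Int) := by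
      rw [pv_sum_filter_lt]
      simp only [PySem.Dict.values, PySem.Dict.items_counter, List.map_map]
      exact pv_sum_count (fun k => 1 < (List.count k xs : Int)) (PySem.Set.ofList xs)
        (PySem.Set.nodup_ofList xs) xs (fun x hx => (PySem.Set.mem_ofList xs x).mpr hx)
    -- under the guard there is at least one n-gram
    have hlen : xs ≠ [] := by
      rw [hxs]
      intro hnil
      have := congrArg List.length hnil
      simp [PySem.List.length_pyRange_one] at this
      omega
    obtain ⟨c0, rest, hys⟩ : ∃ c0 rest, PySem.List.sorted xs (fun g => g) false = c0 :: rest := by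
      cases hys : PySem.List.sorted xs (fun g => g) false with
      | nil => exact absurd ((PySem.List.sorted_eq_nil_iff xs (fun g => g) false).mp hys) hlen
      | cons c0 rest => exact ⟨c0, rest, rfl⟩
    -- the library order lemma lives on the LinearOrder-derived instances; same function
    have hinst : (@PySem.List.sorted (List String) (List String) List.instLinearOrder.toLT
        LinearOrder.toDecidableLT xs (fun g => g) false) = PySem.List.sorted xs (fun g => g) false := by
      congr 1
    have hpair : (c0 :: rest).Pairwise (fun a b => a ≤ b) := by
      have hthis := PySem.List.sorted_pairwise xs (fun g : List String => g)
      rwa [hinst, hys] at hthis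
    obtain ⟨hc0, hrest⟩ := List.pairwise_cons.mp hpair
    have hperm : (c0 :: rest).Perm xs := by
      have hthis := PySem.List.sorted_perm xs (fun g : List String => g) false
      rwa [hys] at hthis
    rw [hys]
    have hB := pv_scan rest hrest c0 hc0 1 0
    simp only [pvPayoff] at hB
    show ((PySem.Dict.counter xs).values.filter (fun v => decide (1 < v))).sum
      = (List.foldl pvStep (c0, 1, 0) rest).2.2
        + if 1 < (List.foldl pvStep (c0, 1, 0) rest).2.1 then (List.foldl pvStep (c0, 1, 0) rest).2.1 else 0
    rw [hB]
    have hR : (0:Int) + (if (1:Int) < 1 + (rest.count c0 : Int) then 1 + (rest.count c0 : Int) else 0)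
        + pvR (rest.filter (· ≠ c0)) = pvR (c0 :: rest) := by
      rw [show pvR (c0 :: rest) = pvPayoff (1 + (rest.count c0 : Int)) + pvR (rest.filter (· ≠ c0)) from by rw [pvR]]
      simp [pvPayoff]
    rw [hR, pv_R_eq_countP]
    rw [hA]
    have hcnt : ∀ g, (c0 :: rest).count g = xs.count g := fun g => hperm.count_eq g
    have hcp : (c0 :: rest).countP (fun g => decide (1 < (c0 :: rest).count g))
        = xs.countP (fun g => decide (1 < (xs.count g : Int))) := by
      rw [hperm.countP_eq]
      apply List.countP_congr
      intro x _
      rw [hcnt x]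
      have hcast : (1 < (xs.count x : Int)) ↔ (1 < xs.count x) := by exact_mod_cast Iff.rfl
      simp [hcast]
    rw [hcp]

-- ===== VERDICT (by name: the statement is the Claim_ definition above) =====
theorem count_repeating_ngrams_spec : Claim_equal_count_repeating_ngrams := by
  intro text n _
  unfold Spec_count_repeating_ngrams
  exact pv_main text n
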